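-- pv_equiv track=rewrite | github.com/XucroYuri/LocalVideo | backend/scripts/migrate_role_identity_to_ref.py | next_ref_id
-- ===== SOURCE A (Python) =====
-- REF_PREFIX = "ref_"
--
-- def next_ref_id(existing_ids: list[str]) -> str:
--     used: set[int] = set()
--     for item in existing_ids:
--         text = str(item or "").strip()
--         if not text.startswith(REF_PREFIX):
--             continue
--         try:
--             used.add(int(text.split("_", 1)[1]))
--         except (IndexError, ValueError):
--             continue
--     next_num = 1
--     while next_num in used:
--         next_num += 1
--     return f"ref_{next_num:02d}"
-- ===== SOURCE B (Python) =====
-- REF_PREFIX = "ref_"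
--
-- def _parse(item):
--     text = str(item or "").strip()
--     if not text.startswith(REF_PREFIX):
--         return None
--     try:
--         return int(text.split("_", 1)[1])
--     except ValueError:
--         return None
--
-- def next_ref_id(existing_ids: list[str]) -> str:
--     used = {v for v in map(_parse, existing_ids) if v is not None and v >= 1}
--     expected = 1
--     for v in sorted(used):
--         if v != expected:
--             break
--         expected += 1
--     return f"ref_{expected:02d}"
-- ===== Notes on version B (the rewrite author's own statement) =====
-- stated objective: alternative
-- what changed: Replaces the unbounded set-membership probe loop (while next_num in used) with a sort-then-single-scan over the distinct positive parsed ids, breaking at the first gap.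
import Mathlib
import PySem

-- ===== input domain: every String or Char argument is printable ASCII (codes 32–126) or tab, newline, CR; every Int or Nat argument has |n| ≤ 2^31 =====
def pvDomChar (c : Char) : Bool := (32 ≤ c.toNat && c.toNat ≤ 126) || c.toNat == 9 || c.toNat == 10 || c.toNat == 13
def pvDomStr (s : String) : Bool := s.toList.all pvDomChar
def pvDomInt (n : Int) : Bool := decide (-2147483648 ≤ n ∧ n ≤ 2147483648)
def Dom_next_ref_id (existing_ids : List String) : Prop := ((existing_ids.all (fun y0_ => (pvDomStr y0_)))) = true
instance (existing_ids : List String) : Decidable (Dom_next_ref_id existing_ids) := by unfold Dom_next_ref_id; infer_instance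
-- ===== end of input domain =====

-- B replaces A's unbounded membership-probe loop by a sort-then-single-scan over the
-- distinct positive parsed ids (objective: alternative algorithm, similar cost).

-- ===== PORT A =====
-- text = str(item or "").strip()   (shared line of both Pythons)
def refText (item : String) : String := PySem.Str.strip (if item == "" then "" else item)

-- A's loop body: parse one id, add it to the set on success
def stepA (s : PySem.Set Int) (item : String) : PySem.Set Int :=
  let text := refText item
  if PySem.Str.startswith text "ref_" then
    match (PySem.Str.splitMax? text "_" 1).bind (fun parts => PySem.List.pyGet? parts 1) with
    | some piece =>
      match PySem.Int.ofStr? piece with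
      | some v => PySem.Set.add s v
      | none => s
    | none => s
  else s

-- A's while-loop: at most |used| iterations are ever taken, so |used| is enough fuel
def nextRefProbe (used : PySem.Set Int) (n : Int) : Nat → Int
  | 0 => n
  | fuel + 1 => if used.contains n then nextRefProbe used (n + 1) fuel else n

def next_ref_id (existing_ids : List String) : String :=
  let used : PySem.Set Int := existing_ids.foldl stepA PySem.Set.empty
  let nextNum := nextRefProbe used 1 used.length
  "ref_" ++ PySem.Str.zfill (PySem.Int.toStr nextNum) 2

-- ===== PORT B =====
def parseRef (item : String) : Option Int :=
  let text := refText item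
  if PySem.Str.startswith text "ref_" then
    ((PySem.Str.splitMax? text "_" 1).bind (fun parts => PySem.List.pyGet? parts 1)).bind
      PySem.Int.ofStr?
  else none

-- the 'for v in sorted(used): if v != expected: break; expected += 1' loop
def scanRef (vals : List Int) (expected : Int) : Int :=
  match vals with
  | [] => expected
  | v :: rest => if v ≠ expected then expected else scanRef rest (expected + 1)

def next_ref_id_alt (existing_ids : List String) : String :=
  let used : PySem.Set Int := PySem.Set.ofList
    ((existing_ids.map parseRef).filterMap (fun o => o.bind (fun v => if 1 ≤ v then some v else none)))
  let expected := scanRef (PySem.List.sorted used (fun x => x) false) 1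
  "ref_" ++ PySem.Str.zfill (PySem.Int.toStr expected) 2

-- ===== PRECONDITION & SPEC =====
def Spec_next_ref_id (existing_ids : List String) (out : String) : Prop := out = next_ref_id_alt existing_ids
instance (existing_ids : List String) (out : String) : Decidable (Spec_next_ref_id existing_ids out) := by unfold Spec_next_ref_id; infer_instance

-- ===== CLAIM (what is proved, stated in full; the proofs are below) =====
def Claim_equal_next_ref_id : Prop := ∀ (existing_ids : List String), Dom_next_ref_id existing_ids → Spec_next_ref_id existing_ids (next_ref_id existing_ids)

-- ===== LEMMAS AND PROOFS =====

-- A's loop body is exactly "add the parsed value if any"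
theorem stepA_eq_parse (s : PySem.Set Int) (item : String) :
    stepA s item = (match parseRef item with
                    | some v => PySem.Set.add s v
                    | none => s) := by
  rw [stepA, parseRef]
  generalize (PySem.Str.splitMax? (refText item) "_" 1).bind
      (fun parts => PySem.List.pyGet? parts 1) = o
  generalize PySem.Str.startswith (refText item) "ref_" = c
  cases c
  · rfl
  · cases o with
    | none => rfl
    | some p => cases PySem.Int.ofStr? p <;> rfl

theorem foldl_stepA (existing_ids : List String) :
    existing_ids.foldl stepA PySem.Set.empty
      = existing_ids.foldl (fun s item =>
          match parseRef item with
          | some v => PySem.Set.add s v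
          | none => s) PySem.Set.empty := by
  have h : stepA = fun s item =>
      match parseRef item with
      | some v => PySem.Set.add s v
      | none => s := funext fun s => funext fun item => stepA_eq_parse s item
  rw [h]

theorem mem_foldl_parse (v : Int) :
    ∀ (l : List String) (s : PySem.Set Int),
      v ∈ l.foldl (fun s item =>
          match parseRef item with
          | some w => PySem.Set.add s w
          | none => s) s
      ↔ v ∈ s ∨ ∃ it ∈ l, parseRef it = some v := by
  intro l
  induction l with
  | nil => intro s; simp
  | cons x xs ih =>
    intro s
    simp only [List.foldl_cons]
    rw [ih]
    cases hx : parseRef x with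
    | none =>
      constructor
      · rintro (hv | ⟨it, hit, hp⟩)
        · exact Or.inl hv
        · exact Or.inr ⟨it, List.mem_cons_of_mem _ hit, hp⟩
      · rintro (hv | ⟨it, hit, hp⟩)
        · exact Or.inl hv
        · rcases List.mem_cons.mp hit with rfl | hit'
          · rw [hx] at hp; cases hp
          · exact Or.inr ⟨it, hit', hp⟩
    | some w =>
      rw [PySem.Set.mem_add]
      constructor
      · rintro ((hv | rfl) | ⟨it, hit, hp⟩)
        · exact Or.inl hv
        · exact Or.inr ⟨x, List.mem_cons_self, hx⟩
        · exact Or.inr ⟨it, List.mem_cons_of_mem _ hit, hp⟩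
      · rintro (hv | ⟨it, hit, hp⟩)
        · exact Or.inl (Or.inl hv)
        · rcases List.mem_cons.mp hit with rfl | hit'
          · rw [hx] at hp
            exact Or.inl (Or.inr (Option.some.inj hp).symm)
          · exact Or.inr ⟨it, hit', hp⟩

-- core: the membership probe equals the sorted-scan, over any strictly sorted list of
-- the ≥ e members of the set, with enough fuel
theorem probe_eq_scan (used : PySem.Set Int) :
    ∀ (vals : List Int) (e : Int) (fuel : Nat),
      vals.Pairwise (· < ·) →
      (∀ v ∈ vals, e ≤ v) →
      (∀ n : Int, e ≤ n → (n ∈ used ↔ n ∈ vals)) →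
      vals.length ≤ fuel →
      nextRefProbe used e fuel = scanRef vals e := by
  intro vals
  induction vals with
  | nil =>
    intro e fuel _ _ hmem _
    have hc : e ∉ used := by
      intro h
      have := (hmem e le_rfl).mp h
      simp at this
    cases fuel with
    | zero => rfl
    | succ f => simp [nextRefProbe, hc, scanRef]
  | cons v rest ih =>
    intro e fuel hs hge hmem hfuel
    cases fuel with
    | zero => simp at hfuel
    | succ f =>
      by_cases hv : v = e
      · subst hv
        have hc : v ∈ used :=
          (hmem v (hge v List.mem_cons_self)).mpr List.mem_cons_self
        have hrest_lt : ∀ w ∈ rest, v < w := fun w hw => (List.pairwise_cons.mp hs).1 w hw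
        have step : nextRefProbe used v (f + 1) = nextRefProbe used (v + 1) f := by
          simp [nextRefProbe, hc]
        rw [step]
        have hsc : scanRef (v :: rest) v = scanRef rest (v + 1) := by simp [scanRef]
        rw [hsc]
        refine ih (v + 1) f (List.pairwise_cons.mp hs).2
          (fun w hw => by have := hrest_lt w hw; omega)
          (fun n hn => ?_) (by simpa using hfuel)
        rw [hmem n (by omega)]
        constructor
        · intro h
          rcases List.mem_cons.mp h with rfl | h'
          · omega
          · exact h'
        · exact fun h => List.mem_cons_of_mem _ h
      · have hev : e < v := lt_of_le_of_ne (hge v List.mem_cons_self) (fun h => hv h.symm)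
        have hc : e ∉ used := by
          intro h
          have he : e ∈ v :: rest := (hmem e le_rfl).mp h
          rcases List.mem_cons.mp he with rfl | h'
          · omega
          · have := (List.pairwise_cons.mp hs).1 e h'
            omega
        simp [nextRefProbe, hc, scanRef, hv]

-- membership in B's filtered set
theorem mem_usedB (existing_ids : List String) (v : Int) :
    v ∈ PySem.Set.ofList
        ((existing_ids.map parseRef).filterMap (fun o => o.bind (fun w => if 1 ≤ w then some w else none)))
      ↔ (∃ it ∈ existing_ids, parseRef it = some v) ∧ 1 ≤ v := by
  rw [PySem.Set.mem_ofList]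
  simp only [List.mem_filterMap, List.mem_map]
  constructor
  · rintro ⟨o, ⟨it, hit, rfl⟩, hov⟩
    cases ho : parseRef it with
    | none => rw [ho] at hov; simp [Option.bind] at hov
    | some w =>
      rw [ho] at hov
      simp only [Option.bind] at hov
      split at hov
      · rename_i h1
        cases hov
        exact ⟨⟨it, hit, ho⟩, h1⟩
      · cases hov
  · rintro ⟨⟨it, hit, hp⟩, h1⟩
    exact ⟨parseRef it, ⟨it, hit, rfl⟩, by rw [hp]; simp [Option.bind, h1]⟩

theorem next_ref_id_eq (existing_ids : List String) :
    next_ref_id existing_ids = next_ref_id_alt existing_ids := by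
  show "ref_" ++ PySem.Str.zfill (PySem.Int.toStr
      (nextRefProbe (existing_ids.foldl stepA PySem.Set.empty) 1
        (existing_ids.foldl stepA PySem.Set.empty).length)) 2
    = "ref_" ++ PySem.Str.zfill (PySem.Int.toStr
      (scanRef (PySem.List.sorted (PySem.Set.ofList
        ((existing_ids.map parseRef).filterMap (fun o => o.bind (fun v => if 1 ≤ v then some v else none))))
        (fun x => x) false) 1)) 2
  refine congrArg (fun x => "ref_" ++ PySem.Str.zfill (PySem.Int.toStr x) 2) ?_
  rw [foldl_stepA]
  have hsorted : (PySem.List.sorted (PySem.Set.ofList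
      ((existing_ids.map parseRef).filterMap (fun o => o.bind (fun v => if 1 ≤ v then some v else none))))
      (fun x => x) false).Pairwise (· < ·) := PySem.List.sorted_ofList_pairwise_lt _
  have hmemvals : ∀ n : Int,
      n ∈ PySem.List.sorted (PySem.Set.ofList
        ((existing_ids.map parseRef).filterMap (fun o => o.bind (fun v => if 1 ≤ v then some v else none))))
        (fun x => x) false
      ↔ (∃ it ∈ existing_ids, parseRef it = some n) ∧ 1 ≤ n := by
    intro n
    rw [PySem.List.mem_sorted]
    exact mem_usedB existing_ids n
  refine probe_eq_scan _ _ 1 _ hsorted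
    (fun v hv => ((hmemvals v).mp hv).2)
    (fun n hn => ?_) ?_
  · rw [mem_foldl_parse, hmemvals]
    constructor
    · rintro (h | h)
      · simp [PySem.Set.empty] at h
      · exact ⟨h, hn⟩
    · intro h; exact Or.inr h.1
  · refine (List.subperm_of_subset (hsorted.imp (fun h => ne_of_lt h)) ?_).length_le
    intro n hnv
    rw [mem_foldl_parse]
    exact Or.inr ((hmemvals n).mp hnv).1

-- ===== VERDICT (by name: the statement is the Claim_ definition above) =====
theorem next_ref_id_spec : Claim_equal_next_ref_id := by
  intro existing_ids _
  unfold Spec_next_ref_id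
  exact next_ref_id_eq existing_ids
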